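-- pv_equiv track=rewrite | github.com/artkpv/code-dojo | _algos/strings/search/kmp.py | construct_dfa
-- ===== SOURCE A (Python) =====
-- def charat(c, chars):
--     return chars.index(c)
--
-- def construct_dfa(pattern, chars):
--     """
--     Constructs DFA by running the partially constructed
--     DFA on pattern itself till current char. Thus we
--     get the largest prefix that matches largest suffix ending
--     on that char.
--     Example. Pattern: ABABACA
--     ABABAC  at state 4 (ABABA)
--       ABA   largest prefix, hence from 4 the same
--             states as from 2 but with A to 5.
--     """
--     X = 0  # state of partially constructed DFA
--     dfa = [[0] * len(pattern) for _ in range(len(chars))]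
--     dfa[charat(pattern[0], chars)][0] = 1
--     for i in range(1, len(pattern)):
--         e = charat(pattern[i], chars)
--         # copy from previous state:
--         for j in range(len(chars)):
--             dfa[j][i] = dfa[j][X]
--         # next success state
--         dfa[e][i] = i + 1
--         # run the partial dfa
--         X = dfa[e][X]
--     return dfa
-- ===== SOURCE B (Python) =====
-- def construct_dfa(pattern, chars):
--     m, r = len(pattern), len(chars)
--     # classic KMP failure (prefix-function) array
--     f = [0] * m
--     k = 0
--     for i in range(1, m):
--         while k > 0 and pattern[i] != pattern[k]:
--             k = f[k - 1]
--         if pattern[i] == pattern[k]: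
--             k += 1
--         f[i] = k
--     # build the DFA column by column: column i is column f[i-1] with the
--     # matching char sent to state i+1; then transpose to rows per char
--     col0 = [0] * r
--     col0[chars.index(pattern[0])] = 1
--     cols = [col0]
--     for i in range(1, m):
--         col = list(cols[f[i - 1]])
--         col[chars.index(pattern[i])] = i + 1
--         cols.append(col)
--     return [[cols[i][j] for i in range(m)] for j in range(r)]
-- ===== Notes on version B (the rewrite author's own statement) =====
-- stated objective: alternative
-- what changed: B first computes the classic KMP failure (prefix-function) array with the while-loop recurrence, then builds the DFA column by column (column i = column f[i-1] with the matching char sent to i+1) and transposes, instead of A's single pass that threads a simulation state X through the partially built row-major table.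
import Mathlib
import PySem

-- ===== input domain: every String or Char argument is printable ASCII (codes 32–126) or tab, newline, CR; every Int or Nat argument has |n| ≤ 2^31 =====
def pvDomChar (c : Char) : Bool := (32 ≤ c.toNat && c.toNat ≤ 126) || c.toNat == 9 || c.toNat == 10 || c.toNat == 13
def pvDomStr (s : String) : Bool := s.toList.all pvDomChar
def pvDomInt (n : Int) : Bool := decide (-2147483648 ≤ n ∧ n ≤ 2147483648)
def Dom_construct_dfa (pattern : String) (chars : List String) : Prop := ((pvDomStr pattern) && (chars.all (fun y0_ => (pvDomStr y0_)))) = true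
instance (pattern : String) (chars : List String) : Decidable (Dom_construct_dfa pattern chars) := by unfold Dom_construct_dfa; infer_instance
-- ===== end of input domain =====

-- B replaces A's threaded simulation state X by the classic KMP failure array and a
-- column-by-column build plus transpose (objective: alternative decomposition, same cost).


-- ===== PORT A =====
-- charat(c, chars) = chars.index(c); none = ValueError (excluded by Pre_)
def charat (c : String) (chars : List String) : Option Nat :=
  PySem.List.index? chars c

-- dfa[j][i] (indices always in range inside Pre_; default only pads the port's totality)
def getE (dfa : List (List Int)) (j i : Nat) : Int := (dfa.getD j []).getD i 0

-- dfa[j][i] = v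
def setE (dfa : List (List Int)) (j i : Nat) (v : Int) : List (List Int) :=
  dfa.set j ((dfa.getD j []).set i v)

-- the inner 'for j in range(len(chars)): dfa[j][i] = dfa[j][X]'
def colCopy (dfa : List (List Int)) (i X : Nat) : List (List Int) :=
  dfa.map (fun row => row.set i (row.getD X 0))

-- 'for i in range(1, len(pattern)): …', threading X; none = ValueError inside the loop
def loopA (ps : List Char) (chars : List String) : Nat → Nat → List (List Int) → Option (List (List Int))
  | i, X, dfa =>
    if _h : i < ps.length then
      match charat (String.mk [ps.getD i ' ']) chars with
      | none => none
      | some e =>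
        let dfa' := setE (colCopy dfa i X) e i ((i : Int) + 1)
        loopA ps chars (i + 1) (getE dfa' e X).toNat dfa'
    else some dfa
  termination_by i _ _ => ps.length - i

def construct_dfa (pattern : String) (chars : List String) : List (List Int) :=
  match pattern.toList with
  | [] => []          -- pattern[0] raises IndexError (outside Pre_)
  | c0 :: _ =>
    match charat (String.mk [c0]) chars with
    | none => []      -- ValueError (outside Pre_)
    | some e0 =>
      match loopA pattern.toList chars 1 0
          (setE (List.replicate chars.length (List.replicate pattern.toList.length (0 : Int)))
            e0 0 1) with
      | none => []    -- ValueError (outside Pre_)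
      | some d => d

-- ===== PORT B =====
-- 'while k > 0 and pattern[i] != pattern[k]: k = f[k-1]'; fuel k bounds the iterations
-- (k strictly decreases since f[k-1] ≤ k-1 for the arrays B builds), so this is exact
def bWhile (ps : List Char) (f : List Nat) (c : Char) : Nat → Nat → Nat
  | k, fuel =>
    match fuel with
    | 0 => k
    | fuel' + 1 =>
      if 0 < k ∧ c ≠ ps.getD k ' ' then bWhile ps f c (f.getD (k - 1) 0) fuel' else k

-- 'for i in range(1, m): … f[i] = k' (k kept as Nat: it is a nonnegative Python int)
def buildF (ps : List Char) : Nat → Nat → List Nat → List Nat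
  | i, k, f =>
    if _h : i < ps.length then
      let c := ps.getD i ' '
      let k1 := bWhile ps f c k k
      let k2 := if c = ps.getD k1 ' ' then k1 + 1 else k1
      buildF ps (i + 1) k2 (f.set i k2)
    else f
  termination_by i _ _ => ps.length - i

-- 'for i in range(1, m): … cols.append(col)'; none = ValueError from chars.index
def buildCols (ps : List Char) (chars : List String) (f : List Nat) :
    Nat → List (List Int) → Option (List (List Int))
  | i, cols =>
    if _h : i < ps.length then
      match charat (String.mk [ps.getD i ' ']) chars with
      | none => none
      | some e =>
        let col := (cols.getD (f.getD (i - 1) 0) []).set e ((i : Int) + 1)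
        buildCols ps chars f (i + 1) (cols ++ [col])
    else some cols
  termination_by i _ => ps.length - i

def construct_dfa_alt (pattern : String) (chars : List String) : List (List Int) :=
  match pattern.toList with
  | [] => []          -- chars.index(pattern[0]) after pattern[0] raises IndexError
  | c0 :: _ =>
    match charat (String.mk [c0]) chars with
    | none => []      -- ValueError (outside Pre_)
    | some e0 =>
      match buildCols pattern.toList chars
          (buildF pattern.toList 1 0 (List.replicate pattern.toList.length 0)) 1
          [(List.replicate chars.length (0 : Int)).set e0 1] with
      | none => []    -- ValueError (outside Pre_)
      | some cols =>
        (List.range chars.length).map (fun j => cols.map (fun col => col.getD j 0))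

-- ===== PRECONDITION & SPEC =====
-- Pre_ excludes exactly the inputs where A raises: empty pattern (IndexError on pattern[0])
-- and a pattern character absent from chars (ValueError from chars.index).
def Pre_construct_dfa (pattern : String) (chars : List String) : Prop :=
  pattern.toList ≠ [] ∧
    pattern.toList.all (fun c => (chars.map String.toList).contains [c]) = true

instance (pattern : String) (chars : List String) : Decidable (Pre_construct_dfa pattern chars) := by
  unfold Pre_construct_dfa; infer_instance

def pvWitness_construct_dfa : String × List String := ("abab", ["a", "b", "c"])

def Spec_construct_dfa (pattern : String) (chars : List String) (out : List (List Int)) : Prop := out = construct_dfa_alt pattern chars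
instance (pattern : String) (chars : List String) (out : List (List Int)) : Decidable (Spec_construct_dfa pattern chars out) := by unfold Spec_construct_dfa; infer_instance

-- ===== CLAIM (what is proved, stated in full; the proofs are below) =====
def Claim_equal_construct_dfa : Prop := ∀ (pattern : String) (chars : List String), Dom_construct_dfa pattern chars → Pre_construct_dfa pattern chars → Spec_construct_dfa pattern chars (construct_dfa pattern chars)

-- ===== LEMMAS AND PROOFS =====

-- first index of c in chars (meaningful when String.mk [c] ∈ chars)
def idx (chars : List String) (c : Char) : Nat :=
  (PySem.List.index? chars (String.mk [c])).getD 0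

-- the value the KMP while-loop leaves, followed by the match test: one f-step
def natStep (ps : List Char) (g : List Nat) (c : Char) (k : Nat) : Nat :=
  let k1 := bWhile ps g c k k
  if c = ps.getD k1 ' ' then k1 + 1 else k1

lemma getD_set_ne' {α : Type} (l : List α) (i j : Nat) (v d : α) (h : j ≠ i) :
    (l.set i v).getD j d = l.getD j d := by
  simp [List.getD_eq_getElem?_getD, List.getElem?_set_ne (Ne.symm h)]

lemma getD_set_self' {α : Type} (l : List α) (i : Nat) (v d : α) (h : i < l.length) :
    (l.set i v).getD i d = v := by
  simp [List.getD_eq_getElem?_getD, List.getElem?_set_self h]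

lemma getD_map_row (dfa : List (List Int)) (g : List Int → List Int) (hg : g [] = []) (j : Nat) :
    (dfa.map g).getD j [] = g (dfa.getD j []) := by
  simp only [List.getD_eq_getElem?_getD, List.getElem?_map]
  cases h : dfa[j]? <;> simp [hg]

lemma charat_eq {chars : List String} {c : Char} (h : String.mk [c] ∈ chars) :
    charat (String.mk [c]) chars = some (idx chars c) := by
  unfold charat idx
  rcases (PySem.List.index?_isSome_iff (xs := chars) (v := String.mk [c])).2 h |> Option.isSome_iff_exists.1 with ⟨k, hk⟩
  rw [PySem.List.index?_eq_idxOf?] at hk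
  simp [PySem.List.index?_eq_idxOf?, hk]

lemma idx_lt {chars : List String} {c : Char} (h : String.mk [c] ∈ chars) :
    idx chars c < chars.length := by
  have h1 := charat_eq h
  unfold charat at h1
  obtain ⟨hk, -, -⟩ := PySem.List.getElem_of_index?_eq_some h1
  exact hk

lemma idx_get {chars : List String} {c : Char} (h : String.mk [c] ∈ chars) :
    chars[idx chars c]? = some (String.mk [c]) := by
  have h1 := charat_eq h
  unfold charat at h1
  obtain ⟨hk, he, -⟩ := PySem.List.getElem_of_index?_eq_some h1
  simp [List.getElem?_eq_getElem hk, he]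

lemma idx_inj {chars : List String} {c c' : Char} (h : String.mk [c] ∈ chars)
    (h' : String.mk [c'] ∈ chars) : idx chars c = idx chars c' ↔ c = c' := by
  constructor
  · intro he
    have h1 := idx_get h
    have h2 := idx_get h'
    rw [he, h2] at h1
    have h3 : String.mk [c'] = String.mk [c] := by simpa using h1
    have e1 : (String.mk [c']).toList = [c'] := Eq.symm ((fun {l} {s} => String.ofList_eq.mp) rfl)
    have e2 : (String.mk [c]).toList = [c] := Eq.symm ((fun {l} {s} => String.ofList_eq.mp) rfl)
    have h4 : ([c'] : List Char) = [c] := by rw [← e1, ← e2, h3]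
    simpa using h4.symm
  · rintro rfl; rfl

lemma bWhile_le (ps : List Char) (f : List Nat) (c : Char)
    (hf : ∀ j, f.getD j 0 ≤ j) : ∀ fuel k, bWhile ps f c k fuel ≤ k := by
  intro fuel
  induction fuel with
  | zero => intro k; simp [bWhile]
  | succ fuel ih =>
    intro k
    simp only [bWhile]
    split
    · rename_i hc
      calc bWhile ps f c (f.getD (k-1) 0) fuel ≤ f.getD (k-1) 0 := ih _
        _ ≤ k - 1 := hf _
        _ ≤ k := Nat.sub_le _ _
    · exact le_refl _

lemma bWhile_fuel (ps : List Char) (f : List Nat) (c : Char)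
    (hf : ∀ j, f.getD j 0 ≤ j) :
    ∀ fuel fuel' k, k ≤ fuel → k ≤ fuel' →
      bWhile ps f c k fuel = bWhile ps f c k fuel' := by
  intro fuel
  induction fuel with
  | zero =>
    intro fuel' k hk _
    interval_cases k
    cases fuel' with
    | zero => rfl
    | succ fuel' => simp [bWhile]
  | succ fuel ih =>
    intro fuel' k hk hk'
    cases fuel' with
    | zero =>
      interval_cases k
      simp [bWhile]
    | succ fuel' =>
      simp only [bWhile]
      split
      · rename_i hc
        have hfk := hf (k-1)
        have h1 : f.getD (k-1) 0 ≤ fuel := by omega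
        have h2 : f.getD (k-1) 0 ≤ fuel' := by omega
        exact ih fuel' _ h1 h2
      · rfl

lemma bWhile_congr (ps : List Char) (f g : List Nat) (c : Char)
    (hf : ∀ j, f.getD j 0 ≤ j) :
    ∀ fuel k, (∀ j, j < k → f.getD j 0 = g.getD j 0) →
      bWhile ps f c k fuel = bWhile ps g c k fuel := by
  intro fuel
  induction fuel with
  | zero => intro k _; rfl
  | succ fuel ih =>
    intro k hag
    simp only [bWhile]
    split
    · rename_i hc
      have hlt : k - 1 < k := Nat.sub_lt hc.1 one_pos
      rw [hag _ hlt]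
      apply ih
      intro j hj
      have hfk := hf (k-1)
      have heq := hag _ hlt
      exact hag j (by omega)
    · rfl

-- the failure array B builds: length, boundedness, prefix-stability, and its recurrence
lemma buildF_main (ps : List Char) :
    ∀ n i k f, n = ps.length - i → 1 ≤ i → f.length = ps.length →
      (∀ j, f.getD j 0 ≤ j) → (∀ j, i ≤ j → f.getD j 0 = 0) → k = f.getD (i-1) 0 →
      (buildF ps i k f).length = ps.length ∧
      (∀ j, (buildF ps i k f).getD j 0 ≤ j) ∧
      (∀ j, j < i → (buildF ps i k f).getD j 0 = f.getD j 0) ∧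
      (∀ j, i ≤ j → j < ps.length →
        (buildF ps i k f).getD j 0
          = natStep ps (buildF ps i k f) (ps.getD j ' ') ((buildF ps i k f).getD (j-1) 0)) := by
  intro n
  induction n with
  | zero =>
    intro i k f hn hi hlen hbnd hz hk
    have hge : ¬ i < ps.length := by omega
    rw [buildF, dif_neg hge]
    refine ⟨hlen, hbnd, fun j _ => rfl, fun j hij hjl => absurd (lt_of_le_of_lt hij hjl) hge⟩
  | succ n ih =>
    intro i k f hn hi hlen hbnd hz hk
    have hlt : i < ps.length := by omega
    rw [buildF, dif_pos hlt]
    set c := ps.getD i ' ' with hc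
    set k1 := bWhile ps f c k k with hk1
    set k2 := (if c = ps.getD k1 ' ' then k1 + 1 else k1) with hk2
    set f' := f.set i k2 with hf'
    have hilen : i < f.length := by omega
    have hk1le : k1 ≤ k := bWhile_le ps f c hbnd k k
    have hkle : k ≤ i - 1 := hk ▸ hbnd (i-1)
    have hk2le : k2 ≤ i := by
      rw [hk2]; split <;> omega
    have hbnd' : ∀ j, f'.getD j 0 ≤ j := by
      intro j
      by_cases hji : j = i
      · subst hji; rw [hf', getD_set_self' _ _ _ _ hilen]; exact hk2le
      · rw [hf', getD_set_ne' _ _ _ _ _ hji]; exact hbnd j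
    have hz' : ∀ j, i + 1 ≤ j → f'.getD j 0 = 0 := by
      intro j hj
      rw [hf', getD_set_ne' _ _ _ _ _ (by omega)]
      exact hz j (by omega)
    have hk' : k2 = f'.getD (i + 1 - 1) 0 := by
      simp only [Nat.add_sub_cancel]
      rw [hf', getD_set_self' _ _ _ _ hilen]
    obtain ⟨rlen, rbnd, rstab, rrec⟩ :=
      ih (i+1) k2 f' (by omega) (by omega) (by rw [hf']; simp [hlen]) hbnd' hz' hk'
    refine ⟨rlen, rbnd, ?_, ?_⟩
    · intro j hj
      rw [rstab j (by omega), hf', getD_set_ne' _ _ _ _ _ (by omega)]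
    · intro j hij hjl
      rcases Nat.lt_or_ge j (i+1) with hji | hji
      · have hji' : j = i := by omega
        subst hji'
        have e1 : (buildF ps (j+1) k2 f').getD j 0 = k2 := by
          rw [rstab j (by omega), hf', getD_set_self' _ _ _ _ hilen]
        have e2 : (buildF ps (j+1) k2 f').getD (j-1) 0 = k := by
          rw [rstab (j-1) (by omega), hf', getD_set_ne' _ _ _ _ _ (by omega), hk]
        rw [e1, e2]
        have hbw : bWhile ps (buildF ps (j+1) k2 f') c k k = k1 := by
          rw [hk1]
          refine (bWhile_congr ps f _ c hbnd k k ?_).symm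
          intro j' hj'
          rw [rstab j' (by omega), hf', getD_set_ne' _ _ _ _ _ (by omega)]
        rw [natStep, hbw]
      · exact rrec j hji hjl

-- entry access through the two levels of A's table
lemma getE_colCopy (dfa : List (List Int)) (i X j t : Nat) (ht : t ≠ i) :
    getE (colCopy dfa i X) j t = getE dfa j t := by
  unfold getE colCopy
  rw [getD_map_row _ _ (by simp)]
  exact getD_set_ne' _ _ _ _ _ ht

lemma getE_colCopy_self (dfa : List (List Int)) (i X j : Nat)
    (hi : i < (dfa.getD j []).length) :
    getE (colCopy dfa i X) j i = getE dfa j X := by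
  unfold getE colCopy
  rw [getD_map_row _ _ (by simp)]
  exact getD_set_self' _ _ _ _ hi

lemma getE_setE_ne (dfa : List (List Int)) (e i v j t)
    (h : j ≠ e ∨ t ≠ i) : getE (setE dfa e i v) j t = getE dfa j t := by
  unfold getE setE
  by_cases hje : j = e
  · subst hje
    rcases h with h | h
    · exact absurd rfl h
    · by_cases he : j < dfa.length
      · rw [getD_set_self' _ _ _ _ he, getD_set_ne' _ _ _ _ _ h]
      · rw [List.set_eq_of_length_le (le_of_not_gt he)]
  · rw [getD_set_ne' _ _ _ _ _ hje]

lemma getE_setE_self (dfa : List (List Int)) (e i v)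
    (he : e < dfa.length) (hi : i < (dfa.getD e []).length) :
    getE (setE dfa e i v) e i = v := by
  unfold getE setE
  rw [getD_set_self' _ _ _ _ he, getD_set_self' _ _ _ _ hi]

lemma colCopy_length (dfa : List (List Int)) (i X) : (colCopy dfa i X).length = dfa.length := by
  simp [colCopy]

lemma setE_length (dfa : List (List Int)) (e i v) : (setE dfa e i v).length = dfa.length := by
  simp [setE]

lemma colCopy_rows (dfa : List (List Int)) (i X) (hm : ∀ row ∈ dfa, row.length = m) :
    ∀ row ∈ colCopy dfa i X, row.length = m := by
  intro row hrow
  simp only [colCopy, List.mem_map] at hrow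
  obtain ⟨r0, hr0, rfl⟩ := hrow
  simpa using hm r0 hr0

lemma getD_row_mem (dfa : List (List Int)) (j : Nat) (hj : j < dfa.length) :
    dfa.getD j [] ∈ dfa := by
  rw [List.getD_eq_getElem _ _ hj]
  exact List.getElem_mem hj

lemma setE_rows (dfa : List (List Int)) (e i v) (hm : ∀ row ∈ dfa, row.length = m) :
    ∀ row ∈ setE dfa e i v, row.length = m := by
  intro row hrow
  unfold setE at hrow
  by_cases he : e < dfa.length
  · rcases List.mem_or_eq_of_mem_set hrow with h | h
    · exact hm row h
    · subst h
      simpa using hm _ (getD_row_mem dfa e he)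
  · rw [List.set_eq_of_length_le (le_of_not_gt he)] at hrow
    exact hm row hrow

-- the column list B builds: existence, length, prefix-stability, recurrence
lemma buildCols_main (ps : List Char) (chars : List String) (F : List Nat)
    (hF : ∀ j, F.getD j 0 ≤ j)
    (hmem : ∀ c ∈ ps, String.mk [c] ∈ chars) :
    ∀ n i cols, n = ps.length - i → 1 ≤ i → i ≤ ps.length → cols.length = i →
      ∃ CS, buildCols ps chars F i cols = some CS ∧ CS.length = ps.length ∧
        (∀ t, t < i → CS.getD t [] = cols.getD t []) ∧
        (∀ t, i ≤ t → t < ps.length →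
          CS.getD t [] = (CS.getD (F.getD (t-1) 0) []).set (idx chars (ps.getD t ' '))
            ((t : Int) + 1)) := by
  intro n
  induction n with
  | zero =>
    intro i cols hn hi hile hclen
    have hge : ¬ i < ps.length := by omega
    rw [buildCols, dif_neg hge]
    exact ⟨cols, rfl, by omega, fun t _ => rfl,
      fun t hit htl => absurd (lt_of_le_of_lt hit htl) hge⟩
  | succ n ih =>
    intro i cols hn hi hile hclen
    have hlt : i < ps.length := by omega
    rw [buildCols, dif_pos hlt]
    have hmemi : ps.getD i ' ' ∈ ps := by
      rw [List.getD_eq_getElem _ _ hlt]; exact List.getElem_mem hlt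
    rw [charat_eq (hmem _ hmemi)]
    set X := F.getD (i-1) 0 with hX
    set col := (cols.getD X []).set (idx chars (ps.getD i ' ')) ((i : Int) + 1) with hcol
    obtain ⟨CS, heq, clen, cstab, crec⟩ :=
      ih (i+1) (cols ++ [col]) (by omega) (by omega) (by omega) (by simp [hclen])
    refine ⟨CS, heq, clen, ?_, ?_⟩
    · intro t ht
      rw [cstab t (by omega), List.getD_append _ _ _ _ (by omega)]
    · intro t hit htl
      rcases Nat.lt_or_ge t (i+1) with hti | hti
      · have : t = i := by omega
        subst this
        have hXle : X ≤ t - 1 := hX ▸ hF (t-1)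
        have e1 : CS.getD t [] = col := by
          rw [cstab t (by omega)]
          have h5 : (cols ++ [col]).getD cols.length [] = col := by
            simp [List.getD_eq_getElem?_getD]
          rw [hclen] at h5
          exact h5
        have e2 : CS.getD X [] = cols.getD X [] := by
          rw [cstab X (by omega), List.getD_append _ _ _ _ (by omega)]
        rw [e1, e2, hcol]
      · exact crec t hti htl

-- every built column has one entry per char
lemma cols_length (ps : List Char) (chars : List String) (F : List Nat) (CS : List (List Int))
    (hF : ∀ j, F.getD j 0 ≤ j)
    (h0 : (CS.getD 0 []).length = chars.length)
    (hrec : ∀ t, 1 ≤ t → t < ps.length →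
      CS.getD t [] = (CS.getD (F.getD (t-1) 0) []).set (idx chars (ps.getD t ' ')) ((t:Int)+1)) :
    ∀ t, t < ps.length → (CS.getD t []).length = chars.length := by
  intro t
  induction t using Nat.strong_induction_on with
  | _ t ih =>
    intro htl
    rcases Nat.eq_zero_or_pos t with h | h
    · subst h; exact h0
    · rw [hrec t h htl]
      simp only [List.length_set]
      have hx := hF (t-1)
      exact ih _ (by omega) (by omega)

lemma getD_mem_ps (ps : List Char) (t : Nat) (ht : t < ps.length) : ps.getD t ' ' ∈ ps := by
  rw [List.getD_eq_getElem _ _ ht]; exact List.getElem_mem ht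

-- the key bridge: reading a built column at the row of pattern[i] is one f-step from that state
lemma colsEntry (ps : List Char) (chars : List String) (F : List Nat) (CS : List (List Int))
    (hF : ∀ j, F.getD j 0 ≤ j)
    (hmem : ∀ c ∈ ps, String.mk [c] ∈ chars)
    (hlen : ∀ t, t < ps.length → (CS.getD t []).length = chars.length)
    (h0 : CS.getD 0 [] = (List.replicate chars.length (0:Int)).set (idx chars (ps.getD 0 ' ')) 1)
    (hrec : ∀ t, 1 ≤ t → t < ps.length →
      CS.getD t [] = (CS.getD (F.getD (t-1) 0) []).set (idx chars (ps.getD t ' ')) ((t:Int)+1)) :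
    ∀ t, t < ps.length → ∀ i, i < ps.length →
      (CS.getD t []).getD (idx chars (ps.getD i ' ')) 0
        = ((natStep ps F (ps.getD i ' ') t : Nat) : Int) := by
  intro t
  induction t using Nat.strong_induction_on with
  | _ t ih =>
    intro htl i hil
    have hmi : String.mk [ps.getD i ' '] ∈ chars := hmem _ (getD_mem_ps ps i hil)
    have hmt : String.mk [ps.getD t ' '] ∈ chars := hmem _ (getD_mem_ps ps t htl)
    rcases Nat.eq_zero_or_pos t with h | h
    · subst h
      rw [h0]
      by_cases hct : ps.getD i ' ' = ps.getD 0 ' '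
      · rw [(idx_inj hmi hmt).2 hct, getD_set_self' _ _ _ _ (by simpa using idx_lt hmt)]
        have hns : natStep ps F (ps.getD i ' ') 0 = 1 := by
          simp only [natStep, bWhile]
          rw [if_pos hct]
        rw [hns]; simp
      · rw [getD_set_ne' _ _ _ _ _ (fun he => hct ((idx_inj hmi hmt).1 he))]
        have hns : natStep ps F (ps.getD i ' ') 0 = 0 := by
          simp only [natStep, bWhile]
          rw [if_neg hct]
        rw [hns]
        simp [List.getD_eq_getElem?_getD]
    · obtain ⟨t', rfl⟩ : ∃ t', t = t' + 1 := ⟨t - 1, by omega⟩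
      rw [hrec _ (by omega) htl]
      simp only [Nat.add_sub_cancel]
      set X := F.getD t' 0 with hX
      have hXle : X ≤ t' := hF t'
      have hXlt : X < ps.length := by omega
      by_cases hct : ps.getD i ' ' = ps.getD (t'+1) ' '
      · have hlenX : idx chars (ps.getD (t'+1) ' ') < (CS.getD X []).length := by
          rw [hlen X hXlt]; exact idx_lt hmt
        rw [(idx_inj hmi hmt).2 hct, getD_set_self' _ _ _ _ hlenX]
        have hns : natStep ps F (ps.getD i ' ') (t'+1) = t' + 2 := by
          simp only [natStep, bWhile, Nat.add_sub_cancel]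
          rw [if_neg (show ¬(0 < t' + 1 ∧ ps.getD i ' ' ≠ ps.getD (t' + 1) ' ') from fun hc => hc.2 hct)]
          rw [if_pos hct]
        rw [hns]; push_cast; ring
      · rw [getD_set_ne' _ _ _ _ _ (fun he => hct ((idx_inj hmi hmt).1 he))]
        rw [ih X (by omega) hXlt i hil]
        have : natStep ps F (ps.getD i ' ') (t'+1) = natStep ps F (ps.getD i ' ') X := by
          simp only [natStep, bWhile, Nat.add_sub_cancel]
          rw [if_pos (show 0 < t' + 1 ∧ ps.getD i ' ' ≠ ps.getD (t' + 1) ' ' from ⟨Nat.succ_pos _, hct⟩)]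
          rw [← hX, bWhile_fuel ps F _ hF t' X X hXle (le_refl X)]
        rw [this]

-- A's loop preserves "columns built so far are B's columns and X is the failure value"
lemma loopA_main (ps : List Char) (chars : List String) (F : List Nat) (CS : List (List Int))
    (hF : ∀ j, F.getD j 0 ≤ j)
    (hFrec : ∀ j, 1 ≤ j → j < ps.length →
      F.getD j 0 = natStep ps F (ps.getD j ' ') (F.getD (j-1) 0))
    (hmem : ∀ c ∈ ps, String.mk [c] ∈ chars)
    (hlen : ∀ t, t < ps.length → (CS.getD t []).length = chars.length)
    (hentry : ∀ t, t < ps.length → ∀ i, i < ps.length →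
      (CS.getD t []).getD (idx chars (ps.getD i ' ')) 0
        = ((natStep ps F (ps.getD i ' ') t : Nat) : Int))
    (hrec : ∀ t, 1 ≤ t → t < ps.length →
      CS.getD t [] = (CS.getD (F.getD (t-1) 0) []).set (idx chars (ps.getD t ' ')) ((t:Int)+1)) :
    ∀ n i X dfa, n = ps.length - i → 1 ≤ i → i ≤ ps.length →
      dfa.length = chars.length → (∀ row ∈ dfa, row.length = ps.length) →
      (∀ j, j < chars.length → ∀ t, t < i → getE dfa j t = (CS.getD t []).getD j 0) →
      X = F.getD (i-1) 0 →
      ∃ D, loopA ps chars i X dfa = some D ∧ D.length = chars.length ∧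
        (∀ row ∈ D, row.length = ps.length) ∧
        (∀ j, j < chars.length → ∀ t, t < ps.length → getE D j t = (CS.getD t []).getD j 0) := by
  intro n
  induction n with
  | zero =>
    intro i X dfa hn hi hile hdlen hrows hcols hX
    have hge : ¬ i < ps.length := by omega
    have hieq : i = ps.length := by omega
    rw [loopA, dif_neg hge]
    exact ⟨dfa, rfl, hdlen, hrows, fun j hj t ht => hcols j hj t (hieq ▸ ht)⟩
  | succ n ih =>
    intro i X dfa hn hi hile hdlen hrows hcols hX
    have hlt : i < ps.length := by omega
    rw [loopA, dif_pos hlt]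
    have hmi : String.mk [ps.getD i ' '] ∈ chars := hmem _ (getD_mem_ps ps i hlt)
    rw [charat_eq hmi]
    set e := idx chars (ps.getD i ' ') with he
    have helt : e < chars.length := idx_lt hmi
    have hXle : X ≤ i - 1 := hX ▸ hF (i-1)
    have hXlt : X < i := by omega
    have hXlen : X < ps.length := by omega
    have hrowlen : ∀ j, j < chars.length → (dfa.getD j []).length = ps.length := by
      intro j hj
      exact hrows _ (getD_row_mem dfa j (by omega))
    have hcopylen : ((colCopy dfa i X).getD e []).length = ps.length := by
      rw [colCopy, getD_map_row _ _ (by simp)]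
      simpa using hrowlen e (by omega)
    set dfa' := setE (colCopy dfa i X) e i ((i : Int) + 1) with hdfa'
    have hdlen' : dfa'.length = chars.length := by
      rw [hdfa', setE_length, colCopy_length, hdlen]
    have hrows' : ∀ row ∈ dfa', row.length = ps.length :=
      setE_rows _ _ _ _ (colCopy_rows _ _ _ hrows)
    have hcols' : ∀ j, j < chars.length → ∀ t, t < i + 1 →
        getE dfa' j t = (CS.getD t []).getD j 0 := by
      intro j hj t ht
      rcases Nat.lt_or_ge t i with hti | hti
      · rw [hdfa', getE_setE_ne _ _ _ _ _ _ (Or.inr (by omega)),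
          getE_colCopy _ _ _ _ _ (by omega)]
        exact hcols j hj t hti
      · have hti' : t = i := by omega
        subst hti'
        by_cases hje : j = e
        · subst hje
          rw [hdfa', getE_setE_self _ _ _ _ (by rw [colCopy_length]; omega) (by rw [hcopylen]; omega)]
          rw [hrec t (by omega) hlt, ← hX, ← he,
            getD_set_self' _ _ _ _ (by rw [hlen X hXlen]; exact helt)]
        · rw [hdfa', getE_setE_ne _ _ _ _ _ _ (Or.inl hje),
            getE_colCopy_self _ _ _ _ (by rw [hrowlen j hj]; omega)]
          rw [hrec t (by omega) hlt, ← hX, ← he,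
            getD_set_ne' _ _ _ _ _ hje]
          exact hcols j hj X hXlt
    have hXnew : (getE dfa' e X).toNat = F.getD (i + 1 - 1) 0 := by
      rw [hdfa', getE_setE_ne _ _ _ _ _ _ (Or.inr (by omega)),
        getE_colCopy _ _ _ _ _ (by omega)]
      rw [hcols e (by omega) X hXlt, he, hentry X hXlen i hlt]
      rw [Int.toNat_natCast]
      rw [Nat.add_sub_cancel, hFrec i (by omega) hlt, hX]
    obtain ⟨D, hD, p1, p2, p3⟩ :=
      ih (i+1) ((getE dfa' e X).toNat) dfa' (by omega) (by omega) (by omega)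
        hdlen' hrows' hcols' hXnew
    exact ⟨D, hD, p1, p2, p3⟩

lemma construct_dfa_eq (pattern : String) (chars : List String) (c0 : Char) (rest : List Char)
    (e0 : Nat) (d : List (List Int)) (h : pattern.toList = c0 :: rest)
    (he : charat (String.mk [c0]) chars = some e0)
    (hd : loopA (c0 :: rest) chars 1 0
      (setE (List.replicate chars.length (List.replicate (c0 :: rest).length (0 : Int))) e0 0 1)
        = some d) :
    construct_dfa pattern chars = d := by
  simp only [construct_dfa, h, he, hd]

lemma construct_dfa_alt_eq (pattern : String) (chars : List String) (c0 : Char) (rest : List Char)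
    (e0 : Nat) (cols : List (List Int)) (h : pattern.toList = c0 :: rest)
    (he : charat (String.mk [c0]) chars = some e0)
    (hc : buildCols (c0 :: rest) chars (buildF (c0 :: rest) 1 0 (List.replicate (c0 :: rest).length 0)) 1
      [(List.replicate chars.length (0 : Int)).set e0 1] = some cols) :
    construct_dfa_alt pattern chars
      = (List.range chars.length).map (fun j => cols.map (fun col => col.getD j 0)) := by
  simp only [construct_dfa_alt, h, he, hc]

lemma getD_replicate_self {α : Type} (a : α) (n j : Nat) : (List.replicate n a).getD j a = a := by
  simp only [List.getD_eq_getElem?_getD, List.getElem?_replicate]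
  split <;> rfl

lemma getE_replicate (r m j t : Nat) (hj : j < r) :
    getE (List.replicate r (List.replicate m (0:Int))) j t = 0 := by
  unfold getE
  have h1 : (List.replicate r (List.replicate m (0:Int))).getD j [] = List.replicate m 0 := by
    rw [List.getD_eq_getElem _ _ (show j < (List.replicate r (List.replicate m (0:Int))).length by simpa using hj)]
    simp
  rw [h1]
  exact getD_replicate_self 0 m t

-- ===== VERDICT (by name: the statement is the Claim_ definition above) =====
theorem construct_dfa_spec : Claim_equal_construct_dfa := by
  unfold Claim_equal_construct_dfa
  intro pattern chars _dom hpre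
  obtain ⟨hne, hall⟩ := hpre
  have hmemP : ∀ c ∈ pattern.toList, String.mk [c] ∈ chars := by
    intro c hc
    have h1 := (List.all_eq_true.1 hall) c hc
    have h2 : [c] ∈ chars.map String.toList := by simpa using h1
    obtain ⟨s, hs, hl⟩ := List.mem_map.1 h2
    have h3 : (String.mk [c]).toList = [c] := Eq.symm ((fun {l} {s} => String.ofList_eq.mp) rfl)
    have h4 : s = String.mk [c] := String.toList_injective (hl.trans h3.symm)
    exact h4 ▸ hs
  unfold Spec_construct_dfa
  obtain ⟨c0, rest, hps⟩ : ∃ c0 rest, pattern.toList = c0 :: rest := by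
    cases h : pattern.toList with
    | nil => exact absurd h hne
    | cons a l => exact ⟨a, l, rfl⟩
  rw [hps] at hmemP
  set L := c0 :: rest with hL
  set m := L.length with hm
  set r := chars.length with hr
  have hm1 : 1 ≤ m := by rw [hm, hL]; simp
  have hmc0 : String.mk [c0] ∈ chars := hmemP c0 (by rw [hL]; exact List.mem_cons_self)
  have hgd0 : L.getD 0 ' ' = c0 := by rw [hL]; rfl
  -- the failure array
  obtain ⟨Flen, Fbnd, Fstab, Frec⟩ := buildF_main L (m - 1) 1 0 (List.replicate m 0)
    (by omega) (le_refl 1) (by simp [hm])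
    (fun j => by rw [getD_replicate_self]; exact Nat.zero_le j)
    (fun j _ => by rw [getD_replicate_self])
    (by rw [getD_replicate_self])
  set F := buildF L 1 0 (List.replicate m 0) with hF
  have hF0 : F.getD 0 0 = 0 := by
    rw [Fstab 0 (by omega), getD_replicate_self]
  -- the column list
  set col0 := (List.replicate r (0:Int)).set (idx chars c0) 1 with hcol0
  obtain ⟨CS, hCSeq, CSlen, CSstab, CSrec⟩ :=
    buildCols_main L chars F Fbnd hmemP (m - 1) 1 [col0] (by omega) (le_refl 1) hm1 rfl
  have h0 : CS.getD 0 [] = col0 := CSstab 0 (by omega)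
  have h0' : CS.getD 0 [] = (List.replicate r (0:Int)).set (idx chars (L.getD 0 ' ')) 1 := by
    rw [h0, hcol0, hgd0]
  have hlenC := cols_length L chars F CS Fbnd (by rw [h0, hcol0]; simp [hr]) CSrec
  have hentry := colsEntry L chars F CS Fbnd hmemP hlenC h0' CSrec
  -- A's loop
  have hi0lt : idx chars c0 < r := idx_lt hmc0
  set dfa0 := List.replicate r (List.replicate m (0:Int)) with hdfa0
  set dfa1 := setE dfa0 (idx chars c0) 0 1 with hdfa1
  have hrows1 : ∀ row ∈ dfa1, row.length = m := by
    apply setE_rows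
    intro row hrow
    rw [List.eq_of_mem_replicate hrow]
    simp
  have hrow0len : (dfa0.getD (idx chars c0) []).length = m := by
    rw [hdfa0, List.getD_eq_getElem _ _ (by simpa using hi0lt)]
    simp
  have hcols1 : ∀ j, j < r → ∀ t, t < 1 → getE dfa1 j t = (CS.getD t []).getD j 0 := by
    intro j hj t ht
    have ht0 : t = 0 := by omega
    subst ht0
    rw [h0, hcol0]
    by_cases hje : j = idx chars c0
    · subst hje
      rw [hdfa1, getE_setE_self _ _ _ _ (by rw [hdfa0]; simpa using hi0lt) (by rw [hrow0len]; omega)]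
      rw [getD_set_self' _ _ _ _ (by simpa using hi0lt)]
    · rw [hdfa1, getE_setE_ne _ _ _ _ _ _ (Or.inl hje), hdfa0, getE_replicate _ _ _ _ hj]
      rw [getD_set_ne' _ _ _ _ _ hje, getD_replicate_self]
  obtain ⟨D, hDeq, Dlen, Drows, Dcols⟩ :=
    loopA_main L chars F CS Fbnd (fun j h1 h2 => Frec j h1 h2) hmemP hlenC hentry CSrec
      (m - 1) 1 0 dfa1 (by omega) (le_refl 1) hm1
      (by rw [hdfa1, setE_length, hdfa0]; simp [hr]) hrows1 hcols1 (by rw [hF0])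
  -- reduce both programs
  rw [construct_dfa_eq pattern chars c0 rest (idx chars c0) D hps (charat_eq hmc0) hDeq,
    construct_dfa_alt_eq pattern chars c0 rest (idx chars c0) CS hps (charat_eq hmc0) hCSeq]
  -- final extensional equality
  apply List.ext_getElem
  · simp [Dlen]
  · intro j hj hj'
    have hjr : j < r := by simpa [Dlen] using hj
    rw [List.getElem_map, List.getElem_range]
    apply List.ext_getElem
    · have := Drows _ (List.getElem_mem hj)
      simp [this, CSlen]
    · intro t ht ht'
      have htm : t < m := by
        have := Drows _ (List.getElem_mem hj)
        rw [this] at ht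
        exact ht
      have e1 : D[j][t] = getE D j t := by
        unfold getE
        rw [List.getD_eq_getElem _ _ (by omega : j < D.length),
          List.getD_eq_getElem _ _ (by rw [Drows _ (List.getElem_mem hj)]; omega : t < D[j].length)]
      rw [e1, Dcols j hjr t htm, List.getElem_map]
      rw [List.getD_eq_getElem _ _ (show t < CS.length by rw [CSlen]; exact htm)]
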